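-- pv_equiv track=rewrite | github.com/Saddff2/python-practice | oop_exercises/merging tuple.py | my_merge_tuple
-- ===== SOURCE A (Python) =====
-- def my_merge_tuple(a:tuple, b:tuple, is_first_loop:bool = True)->list:
--     result = []
--     reverse = []
--     for i in a:
--         for j in b:
--             result.append((i,j))
--     if is_first_loop:
--         reverse = my_merge_tuple(b, a, is_first_loop = False)
--     return result + reverse
-- ===== SOURCE B (Python) =====
-- def my_merge_tuple(a: tuple, b: tuple, is_first_loop: bool = True) -> list:
--     n, m = len(a), len(b)
--     first = n * m
--     total = first * 2 if is_first_loop else first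
--     out = []
--     for k in range(total):
--         if k < first:
--             out.append((a[k // m], b[k % m]))
--         else:
--             t = k - first
--             out.append((b[t // n], a[t % n]))
--     return out
-- ===== Notes on version B (the rewrite author's own statement) =====
-- stated objective: alternative
-- what changed: Replaced the nested loops and the boolean-gated self-recursion by one flat loop over range(total) that decodes each output position k with divmod into the right (a,b) or (b,a) pair.
import Mathlib
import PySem

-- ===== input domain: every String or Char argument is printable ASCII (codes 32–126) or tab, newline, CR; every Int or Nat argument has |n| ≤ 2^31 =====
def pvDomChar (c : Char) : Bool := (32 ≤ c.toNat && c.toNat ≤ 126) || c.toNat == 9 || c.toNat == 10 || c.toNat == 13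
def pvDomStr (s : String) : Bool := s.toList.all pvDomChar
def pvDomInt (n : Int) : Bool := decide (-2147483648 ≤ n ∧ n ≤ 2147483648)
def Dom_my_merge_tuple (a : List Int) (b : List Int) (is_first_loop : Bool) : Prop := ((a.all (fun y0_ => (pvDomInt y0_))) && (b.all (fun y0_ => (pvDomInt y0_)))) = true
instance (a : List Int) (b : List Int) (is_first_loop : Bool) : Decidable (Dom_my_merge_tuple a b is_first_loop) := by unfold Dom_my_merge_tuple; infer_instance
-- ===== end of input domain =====

-- B replaces A's nested loops plus self-recursion by one flat index loop decoded with divmod (objective: alternative, same cost).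

-- ===== PORT A =====
-- Literal port of A: the nested append loops, and the self-recursive call when is_first_loop
def my_merge_tuple (a : List Int) (b : List Int) (is_first_loop : Bool) : List (Int × Int) :=
  let result := a.foldl (fun result i => b.foldl (fun result j => result ++ [(i, j)]) result) []
  let reverse :=
    match is_first_loop with
    | true => my_merge_tuple b a false
    | false => ([] : List (Int × Int))
  result ++ reverse
termination_by is_first_loop.toNat
decreasing_by decide

-- ===== PORT B =====
-- Port of B: one loop over range(total); position k is decoded with // and % into the pair.
-- a[k // m] etc. use pyGetD with default 0: exact here because the decoded indices are always in range.
def my_merge_tuple_alt (a : List Int) (b : List Int) (is_first_loop : Bool) : List (Int × Int) :=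
  let n : Int := a.length
  let m : Int := b.length
  let first := n * m
  let total := if is_first_loop then first * 2 else first
  (PySem.List.pyRange 0 total 1).foldl (fun out k =>
    if k < first then
      out ++ [(PySem.List.pyGetD a (PySem.Int.floordiv k m) 0,
               PySem.List.pyGetD b (PySem.Int.mod k m) 0)]
    else
      let t := k - first
      out ++ [(PySem.List.pyGetD b (PySem.Int.floordiv t n) 0,
               PySem.List.pyGetD a (PySem.Int.mod t n) 0)]) []

-- ===== PRECONDITION & SPEC =====
def Spec_my_merge_tuple (a : List Int) (b : List Int) (is_first_loop : Bool) (out : List (Int × Int)) : Prop := out = my_merge_tuple_alt a b is_first_loop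
instance (a : List Int) (b : List Int) (is_first_loop : Bool) (out : List (Int × Int)) : Decidable (Spec_my_merge_tuple a b is_first_loop out) := by unfold Spec_my_merge_tuple; infer_instance

-- ===== CLAIM (what is proved, stated in full; the proofs are below) =====
def Claim_equal_my_merge_tuple : Prop := ∀ (a : List Int) (b : List Int) (is_first_loop : Bool), Dom_my_merge_tuple a b is_first_loop → Spec_my_merge_tuple a b is_first_loop (my_merge_tuple a b is_first_loop)

-- ===== LEMMAS AND PROOFS =====

-- A's nested foldl builds the cartesian product a×b in flatMap form.
theorem my_merge_tuple_A_loop (a b : List Int) (acc : List (Int × Int)) :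
    a.foldl (fun result i => b.foldl (fun result j => result ++ [(i, j)]) result) acc
      = acc ++ a.flatMap (fun i => b.map (fun j => (i, j))) := by
  induction a generalizing acc with
  | nil => simp
  | cons x xs ih =>
      rw [List.foldl_cons, PySem.List.foldl_append_singleton_eq_map, ih]
      simp

theorem map_getD_range (ys : List Int) :
    (List.range ys.length).map (fun k => ys.getD k 0) = ys := by
  apply List.ext_getElem
  · simp
  · intro i h1 h2
    simp at h2
    simp [List.getElem?_eq_getElem h2]

-- Decoding the flat index k with / and % over range (|xs|*|ys|) yields the cartesian product xs×ys.
theorem flat_index_decode (xs ys : List Int) :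
    (List.range (xs.length * ys.length)).map
      (fun k => (xs.getD (k / ys.length) 0, ys.getD (k % ys.length) 0))
      = xs.flatMap (fun i => ys.map (fun j => (i, j))) := by
  cases hys : ys with
  | nil => simp
  | cons y ys' =>
    rw [← hys]
    have hm : 0 < ys.length := by rw [hys]; simp
    induction xs with
    | nil => simp
    | cons x xs ih =>
      have hlen : (x :: xs).length * ys.length = ys.length + xs.length * ys.length := by
        simp [Nat.succ_mul, Nat.add_comm]
      rw [hlen, List.range_add, List.map_append, List.map_map]
      have h1 : (List.range ys.length).map
          (fun k => ((x :: xs).getD (k / ys.length) 0, ys.getD (k % ys.length) 0))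
          = ys.map (fun j => (x, j)) := by
        have hys2 := congrArg (List.map (fun j => (x, j))) (map_getD_range ys)
        rw [List.map_map] at hys2
        rw [← hys2]
        apply List.map_congr_left
        intro k hk
        rw [List.mem_range] at hk
        simp [Nat.div_eq_of_lt hk, Nat.mod_eq_of_lt hk]
      have h2 : (List.range (xs.length * ys.length)).map
          ((fun k => ((x :: xs).getD (k / ys.length) 0, ys.getD (k % ys.length) 0)) ∘
            (fun k => ys.length + k))
          = (List.range (xs.length * ys.length)).map
            (fun k => (xs.getD (k / ys.length) 0, ys.getD (k % ys.length) 0)) := by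
        apply List.map_congr_left
        intro t _
        simp only [Function.comp]
        have hd : (ys.length + t) / ys.length = t / ys.length + 1 := by
          rw [Nat.add_comm, Nat.add_div_right _ hm]
        have hmod : (ys.length + t) % ys.length = t % ys.length := Nat.add_mod_left _ _
        rw [hd, hmod]
        simp
      rw [h1, h2, ih]
      simp

-- The Int-level map over pyRange 0 (|xs|*|ys|) with pyGetD/floordiv/mod is the same product.
theorem half_decode (xs ys : List Int) :
    (PySem.List.pyRange 0 ((xs.length : Int) * (ys.length : Int)) 1).map
      (fun k => (PySem.List.pyGetD xs (PySem.Int.floordiv k (ys.length : Int)) 0,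
                 PySem.List.pyGetD ys (PySem.Int.mod k (ys.length : Int)) 0))
      = xs.flatMap (fun i => ys.map (fun j => (i, j))) := by
  have hN : ((xs.length : Int) * (ys.length : Int)) = ((xs.length * ys.length : Nat) : Int) := by
    push_cast; ring
  rw [hN, PySem.List.pyRange_zero_nat, List.map_map]
  rw [← flat_index_decode xs ys]
  apply List.map_congr_left
  intro k _
  simp only [Function.comp, PySem.Int.floordiv_natCast, PySem.Int.mod_natCast,
    PySem.List.pyGetD_natCast, List.getD]

-- B's foldl, with the branch hoisted inside the appended singleton.
theorem alt_foldl_eq_map (a b : List Int) (total : Int) :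
    (PySem.List.pyRange 0 total 1).foldl (fun out k =>
      if k < (a.length : Int) * (b.length : Int) then
        out ++ [(PySem.List.pyGetD a (PySem.Int.floordiv k (b.length : Int)) 0,
                 PySem.List.pyGetD b (PySem.Int.mod k (b.length : Int)) 0)]
      else
        let t := k - (a.length : Int) * (b.length : Int)
        out ++ [(PySem.List.pyGetD b (PySem.Int.floordiv t (a.length : Int)) 0,
                 PySem.List.pyGetD a (PySem.Int.mod t (a.length : Int)) 0)]) []
    = (PySem.List.pyRange 0 total 1).map (fun k =>
        if k < (a.length : Int) * (b.length : Int) then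
          (PySem.List.pyGetD a (PySem.Int.floordiv k (b.length : Int)) 0,
           PySem.List.pyGetD b (PySem.Int.mod k (b.length : Int)) 0)
        else
          (PySem.List.pyGetD b (PySem.Int.floordiv (k - (a.length : Int) * (b.length : Int)) (a.length : Int)) 0,
           PySem.List.pyGetD a (PySem.Int.mod (k - (a.length : Int) * (b.length : Int)) (a.length : Int)) 0)) := by
  have hbody : (fun (out : List (Int × Int)) (k : Int) =>
      if k < (a.length : Int) * (b.length : Int) then
        out ++ [(PySem.List.pyGetD a (PySem.Int.floordiv k (b.length : Int)) 0,
                 PySem.List.pyGetD b (PySem.Int.mod k (b.length : Int)) 0)]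
      else
        let t := k - (a.length : Int) * (b.length : Int)
        out ++ [(PySem.List.pyGetD b (PySem.Int.floordiv t (a.length : Int)) 0,
                 PySem.List.pyGetD a (PySem.Int.mod t (a.length : Int)) 0)])
      = (fun out k => out ++ [if k < (a.length : Int) * (b.length : Int) then
          (PySem.List.pyGetD a (PySem.Int.floordiv k (b.length : Int)) 0,
           PySem.List.pyGetD b (PySem.Int.mod k (b.length : Int)) 0)
        else
          (PySem.List.pyGetD b (PySem.Int.floordiv (k - (a.length : Int) * (b.length : Int)) (a.length : Int)) 0,
           PySem.List.pyGetD a (PySem.Int.mod (k - (a.length : Int) * (b.length : Int)) (a.length : Int)) 0)]) := by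
    funext out k
    split <;> rfl
  rw [hbody, PySem.List.foldl_append_singleton_eq_map, List.nil_append]

-- ===== VERDICT (by name: the statement is the Claim_ definition above) =====
theorem my_merge_tuple_spec : Claim_equal_my_merge_tuple := by
  intro a b fl _
  unfold Spec_my_merge_tuple my_merge_tuple_alt
  rw [my_merge_tuple.eq_def]
  simp only []
  rw [my_merge_tuple_A_loop, List.nil_append]
  cases fl with
  | false =>
      rw [if_neg (by simp), alt_foldl_eq_map]
      have := half_decode a b
      rw [← this]
      simp only [List.append_nil]
      apply List.map_congr_left
      intro k hk
      rw [PySem.List.mem_pyRange_one] at hk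
      rw [if_pos hk.2]
  | true =>
      rw [my_merge_tuple.eq_def, my_merge_tuple_A_loop, List.nil_append, List.append_nil,
        if_pos rfl, alt_foldl_eq_map]
      have hfirst_nonneg : (0 : Int) ≤ (a.length : Int) * (b.length : Int) := by positivity
      rw [PySem.List.pyRange_one_append 0 ((a.length : Int) * (b.length : Int))
        (((a.length : Int) * (b.length : Int)) * 2) hfirst_nonneg (by linarith), List.map_append]
      congr 1
      · rw [← half_decode a b]
        apply List.map_congr_left
        intro k hk
        rw [PySem.List.mem_pyRange_one] at hk
        rw [if_pos hk.2]
      · -- second half: shift the range down by first and use half_decode b a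
        have h2 := half_decode b a
        rw [show ((b.length : Int) * (a.length : Int)) = ((a.length : Int) * (b.length : Int)) from mul_comm _ _] at h2
        rw [← h2]
        rw [show ((a.length : Int) * (b.length : Int)) * 2
            = ((a.length : Int) * (b.length : Int)) + ((a.length : Int) * (b.length : Int)) from by ring]
        rw [PySem.List.pyRange_one ((a.length : Int) * (b.length : Int)) _,
          PySem.List.pyRange_one 0 _, List.map_map, List.map_map]
        have hto : (((a.length : Int) * (b.length : Int) + (a.length : Int) * (b.length : Int))
            - (a.length : Int) * (b.length : Int)) = ((a.length : Int) * (b.length : Int)) - 0 := by ring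
        rw [hto]
        apply List.map_congr_left
        intro k _
        simp only [Function.comp]
        have hnotlt : ¬ ((a.length : Int) * (b.length : Int) + (k : Int) < (a.length : Int) * (b.length : Int)) := by
          have : (0 : Int) ≤ (k : Int) := Int.natCast_nonneg k
          omega
        rw [if_neg hnotlt]
        have ht : ((a.length : Int) * (b.length : Int) + (k : Int)) - (a.length : Int) * (b.length : Int)
            = (0 : Int) + (k : Int) := by ring
        rw [ht]
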